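-- pv_equiv track=rewrite | github.com/yeahhh1e/PYTHON | TEST/Month_end/0729_Sol/problem11.py | max_adjacent_sum
-- ===== SOURCE A (Python) =====
-- def max_adjacent_sum(matrix):
--     pass
--     # 여기에 코드를 작성하여 함수를 완성합니다.
--     max_num = -999999
--     # matrix를 순회하며 초기 설정 값 max 보다 크면 max 값을 해당 값으로 바꾼다
--     for i in range(len(matrix)):
--         for j in range(len(matrix[0])): # matrix[0] 으로 열의 수로 해줘야 런타임 오류 나지 않음
--             # 해당 값 주변과 더한 총 합 total
--             total = 0
--             # 상하좌우 인덱스 순회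
--             for x, y in ((i, j), (i - 1, j), (i + 1, j), (i, j - 1), (i, j + 1)): # 튜플이 아닌 리스트로 해도 동일한 결과
--                 # 인덱스의 값이 0보다 크고 매트릭스의 크기보다 작아야 오류가 발생하지 않음
--                 if 0 <= x < len(matrix) and 0 <= y < len(matrix[0]):
--                     total += matrix[x][y]
--
--             if max_num < total:
--                 max_num = total
--
--     return max_num
-- ===== SOURCE B (Python) =====
-- def max_adjacent_sum(matrix):
--     rows = len(matrix)
--     cols = len(matrix[0]) if matrix else 0
--     # scatter: each cell's value is added into every in-bounds plus-center it belongs to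
--     sums = [[0] * cols for _ in range(rows)]
--     for i in range(rows):
--         for j in range(cols):
--             v = matrix[i][j]
--             for x, y in ((i, j), (i - 1, j), (i + 1, j), (i, j - 1), (i, j + 1)):
--                 if 0 <= x < rows and 0 <= y < cols:
--                     sums[x][y] += v
--     best = -999999
--     for row in sums:
--         for s in row:
--             if best < s:
--                 best = s
--     return best
-- ===== Notes on version B (the rewrite author's own statement) =====
-- stated objective: alternative
-- what changed: A gathers: for every center cell it re-reads its five plus-neighbours and keeps a running max; B scatters: one pass adds each cell's value into every in-bounds plus-center of a fresh accumulator grid, then takes the max over that grid.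
import Mathlib
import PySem

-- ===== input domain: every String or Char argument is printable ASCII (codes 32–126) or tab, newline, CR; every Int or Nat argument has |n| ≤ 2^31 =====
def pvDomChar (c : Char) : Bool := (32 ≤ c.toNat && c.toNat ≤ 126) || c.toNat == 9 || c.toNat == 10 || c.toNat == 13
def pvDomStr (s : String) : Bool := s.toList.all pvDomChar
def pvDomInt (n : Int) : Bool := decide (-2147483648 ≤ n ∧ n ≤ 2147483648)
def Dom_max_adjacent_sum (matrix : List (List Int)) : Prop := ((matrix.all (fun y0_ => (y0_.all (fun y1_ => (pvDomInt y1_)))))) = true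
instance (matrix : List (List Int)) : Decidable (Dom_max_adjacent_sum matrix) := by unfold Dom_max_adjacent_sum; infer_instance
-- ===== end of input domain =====

-- B replaces A's gather (re-read the five plus-neighbours of every center, running max)
-- by a scatter (one pass adds each cell's value into every in-bounds plus-center of a
-- fresh zero grid, then the max over that grid is taken); same cost, different decomposition.

-- ===== PORT A =====
def max_adjacent_sum (matrix : List (List Int)) : Int :=
  (PySem.List.pyRange 0 (PySem.List.len matrix) 1).foldl (fun max_num i =>
    (PySem.List.pyRange 0 (PySem.List.len (PySem.List.pyGetD matrix 0 [])) 1).foldl (fun max_num j =>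
      let total : Int :=
        ([(i, j), (i - 1, j), (i + 1, j), (i, j - 1), (i, j + 1)] : List (Int × Int)).foldl
          (fun total xy =>
            if 0 ≤ xy.1 ∧ xy.1 < PySem.List.len matrix ∧ 0 ≤ xy.2 ∧ xy.2 < PySem.List.len (PySem.List.pyGetD matrix 0 [])
            then total + PySem.List.pyGetD (PySem.List.pyGetD matrix xy.1 []) xy.2 0
            else total) 0
      if max_num < total then total else max_num) max_num) (-999999)

-- ===== PORT B =====
-- sums[x][y] += v  (x, y already checked in bounds by the caller's guard, so toNat is exact)
def pvAddAt (g : List (List Int)) (x y : Nat) (v : Int) : List (List Int) :=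
  g.modify x (fun row => row.modify y (fun s => s + v))

-- the inner 5-iteration scatter loop of Source B for one source cell (i, j) of value v
def pvScat5 (R C : Int) (v : Int) (g : List (List Int)) (i j : Int) : List (List Int) :=
  ([(i, j), (i - 1, j), (i + 1, j), (i, j - 1), (i, j + 1)] : List (Int × Int)).foldl
    (fun g xy =>
      if 0 ≤ xy.1 ∧ xy.1 < R ∧ 0 ≤ xy.2 ∧ xy.2 < C then pvAddAt g xy.1.toNat xy.2.toNat v else g) g

def max_adjacent_sum_alt (matrix : List (List Int)) : Int :=
  let rows := matrix.length
  let cols := (matrix.headD []).length     -- len(matrix[0]) if matrix else 0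
  let sums0 := List.replicate rows (List.replicate cols (0 : Int))
  let sums := (List.range rows).foldl (fun g i =>
    (List.range cols).foldl (fun g j =>
      pvScat5 (rows : Int) (cols : Int) ((matrix.getD i []).getD j 0) g (i : Int) (j : Int)) g) sums0
  sums.foldl (fun best row => row.foldl (fun best s => if best < s then s else best) best) (-999999)

-- ===== PRECONDITION & SPEC =====
-- Pre_ excludes exactly the inputs where Python A raises IndexError: a non-empty matrix
-- with some row shorter than the first row (A indexes every row up to len(matrix[0])).
def Pre_max_adjacent_sum (matrix : List (List Int)) : Prop :=
  ∀ row ∈ matrix, (matrix.headD []).length ≤ row.length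
instance (matrix : List (List Int)) : Decidable (Pre_max_adjacent_sum matrix) := by
  unfold Pre_max_adjacent_sum; infer_instance
def pvWitness_max_adjacent_sum : List (List Int) := [[1, 2], [3, 4]]

def Spec_max_adjacent_sum (matrix : List (List Int)) (out : Int) : Prop := out = max_adjacent_sum_alt matrix
instance (matrix : List (List Int)) (out : Int) : Decidable (Spec_max_adjacent_sum matrix out) := by unfold Spec_max_adjacent_sum; infer_instance

-- ===== CLAIM (what is proved, stated in full; the proofs are below) =====
def Claim_equal_max_adjacent_sum : Prop := ∀ (matrix : List (List Int)), Dom_max_adjacent_sum matrix → Pre_max_adjacent_sum matrix → Spec_max_adjacent_sum matrix (max_adjacent_sum matrix)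

-- ===== LEMMAS AND PROOFS =====

-- the value both programs read at in-bounds (x, y)
def pvVal (matrix : List (List Int)) (x y : Nat) : Int := (matrix.getD x []).getD y 0

-- A's inner `total` for center (x, y), in getD form
def pvTot (matrix : List (List Int)) (R C : Int) (x y : Int) : Int :=
  ([(x, y), (x - 1, y), (x + 1, y), (x, y - 1), (x, y + 1)] : List (Int × Int)).foldl
    (fun total xy =>
      if 0 ≤ xy.1 ∧ xy.1 < R ∧ 0 ≤ xy.2 ∧ xy.2 < C
      then total + pvVal matrix xy.1.toNat xy.2.toNat
      else total) 0

def pvShape (g : List (List Int)) (R C : Nat) : Prop := g.length = R ∧ ∀ r ∈ g, r.length = C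

def pvE (g : List (List Int)) (x y : Nat) : Int := (g.getD x []).getD y 0

-- contribution of source cell (i, j) of value v to center (x, y)
def pvC (i j x y : Int) (v : Int) : Int :=
  (if i = x ∧ j = y then v else 0) + (if i - 1 = x ∧ j = y then v else 0) +
  (if i + 1 = x ∧ j = y then v else 0) + (if i = x ∧ j - 1 = y then v else 0) +
  (if i = x ∧ j + 1 = y then v else 0)

theorem pvAddAt_shape {g : List (List Int)} {R C : Nat} (h : pvShape g R C) (x y : Nat) (v : Int) :
    pvShape (pvAddAt g x y v) R C := by
  obtain ⟨h1, h2⟩ := h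
  refine ⟨by simp [pvAddAt, h1], ?_⟩
  intro r hr
  rw [List.mem_iff_getElem?] at hr
  obtain ⟨k, hk⟩ := hr
  rw [pvAddAt, List.getElem?_modify] at hk
  cases hg : g[k]? with
  | none => simp [hg] at hk
  | some row =>
    have hrow : row.length = C := h2 row (List.mem_of_getElem? hg)
    simp only [hg, Option.map_eq_map, Option.map_some, Option.some_inj] at hk
    by_cases hxk : x = k
    · simp only [if_pos hxk] at hk
      simp [← hk, hrow]
    · simp only [if_neg hxk] at hk
      simp [← hk, hrow]

theorem pvAddAt_entry {g : List (List Int)} {R C : Nat} (h : pvShape g R C)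
    {x' y' : Nat} (v : Int) (x y : Nat) (hx : x < R) (hy : y < C) :
    pvE (pvAddAt g x' y' v) x y = pvE g x y + (if x' = x ∧ y' = y then v else 0) := by
  obtain ⟨h1, h2⟩ := h
  have hxg : x < g.length := h1 ▸ hx
  have hrow : g[x].length = C := h2 _ (List.getElem_mem hxg)
  simp only [pvE, pvAddAt, List.getD_eq_getElem?_getD, List.getElem?_modify]
  rw [List.getElem?_eq_getElem hxg]
  by_cases hxx : x' = x
  · subst hxx
    simp only [Option.map_eq_map, Option.map_some, if_true, Option.getD_some, true_and]
    rw [List.getElem?_modify, List.getElem?_eq_getElem (hrow ▸ hy)]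
    by_cases hyy : y' = y
    · subst hyy; simp
    · simp [hyy]
  · simp [hxx]

theorem pvStep_shape {g : List (List Int)} {R C : Nat} (h : pvShape g R C) (v : Int) (a b : Int) :
    pvShape (if 0 ≤ a ∧ a < (R : Int) ∧ 0 ≤ b ∧ b < (C : Int) then pvAddAt g a.toNat b.toNat v else g) R C := by
  split
  · exact pvAddAt_shape h _ _ _
  · exact h

theorem pvStep_entry {g : List (List Int)} {R C : Nat} (h : pvShape g R C) (v : Int) (a b : Int)
    (x y : Nat) (hx : x < R) (hy : y < C) :
    pvE (if 0 ≤ a ∧ a < (R : Int) ∧ 0 ≤ b ∧ b < (C : Int) then pvAddAt g a.toNat b.toNat v else g) x y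
      = pvE g x y + (if a = (x : Int) ∧ b = (y : Int) then v else 0) := by
  by_cases hg : 0 ≤ a ∧ a < (R : Int) ∧ 0 ≤ b ∧ b < (C : Int)
  · rw [if_pos hg, pvAddAt_entry h v x y hx hy]
    congr 1
    have h1 : a.toNat = x ↔ a = (x : Int) := by omega
    have h2 : b.toNat = y ↔ b = (y : Int) := by omega
    simp [h1, h2]
  · rw [if_neg hg]
    have : ¬ (a = (x : Int) ∧ b = (y : Int)) := by
      rintro ⟨rfl, rfl⟩; exact hg ⟨by omega, by omega, by omega, by omega⟩
    simp [this]

theorem pvScat5_shape {g : List (List Int)} {R C : Nat} (h : pvShape g R C) (v : Int) (i j : Int) :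
    pvShape (pvScat5 (R : Int) (C : Int) v g i j) R C := by
  simp only [pvScat5, List.foldl]
  exact pvStep_shape (pvStep_shape (pvStep_shape (pvStep_shape (pvStep_shape h v i j) v (i-1) j) v (i+1) j) v i (j-1)) v i (j+1)

theorem pvScat5_entry {g : List (List Int)} {R C : Nat} (h : pvShape g R C) (v : Int) (i j : Int)
    (x y : Nat) (hx : x < R) (hy : y < C) :
    pvE (pvScat5 (R : Int) (C : Int) v g i j) x y = pvE g x y + pvC i j (x : Int) (y : Int) v := by
  simp only [pvScat5, List.foldl]
  have s1 := pvStep_shape h v i j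
  have s2 := pvStep_shape s1 v (i-1) j
  have s3 := pvStep_shape s2 v (i+1) j
  have s4 := pvStep_shape s3 v i (j-1)
  rw [pvStep_entry s4 v i (j+1) x y hx hy, pvStep_entry s3 v i (j-1) x y hx hy,
      pvStep_entry s2 v (i+1) j x y hx hy, pvStep_entry s1 v (i-1) j x y hx hy,
      pvStep_entry h v i j x y hx hy, pvC]
  ring

-- the scatter loop over one source row
theorem pvRow_shape (m : List (List Int)) {R C : Nat} (i : Nat) (n : Nat) {g : List (List Int)}
    (h : pvShape g R C) :
    pvShape ((List.range n).foldl (fun g j => pvScat5 (R : Int) (C : Int) (pvVal m i j) g (i : Int) (j : Int)) g) R C := by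
  induction n generalizing g with
  | zero => simpa using h
  | succ n ih =>
    rw [List.range_succ, List.foldl_append]
    exact pvScat5_shape (ih h) _ _ _

theorem pvRow_entry (m : List (List Int)) {R C : Nat} (i : Nat) (n : Nat) {g : List (List Int)}
    (h : pvShape g R C) (x y : Nat) (hx : x < R) (hy : y < C) :
    pvE ((List.range n).foldl (fun g j => pvScat5 (R : Int) (C : Int) (pvVal m i j) g (i : Int) (j : Int)) g) x y
      = pvE g x y + ((List.range n).map (fun (j : Nat) => pvC (i : Int) (j : Int) (x : Int) (y : Int) (pvVal m i j))).sum := by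
  induction n generalizing g with
  | zero => simp
  | succ n ih =>
    rw [List.range_succ, List.foldl_append, List.map_append, List.sum_append]
    simp only [List.foldl_cons, List.foldl_nil, List.map_cons, List.map_nil, List.sum_cons,
      List.sum_nil, add_zero]
    rw [pvScat5_entry (pvRow_shape m i n h) _ _ _ x y hx hy, ih h]
    ring

-- the whole scatter loop
theorem pvGrid_shape (m : List (List Int)) {R C : Nat} (n : Nat) {g : List (List Int)}
    (h : pvShape g R C) :
    pvShape ((List.range n).foldl (fun g i =>
      (List.range C).foldl (fun g j => pvScat5 (R : Int) (C : Int) (pvVal m i j) g (i : Int) (j : Int)) g) g) R C := by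
  induction n generalizing g with
  | zero => simpa using h
  | succ n ih =>
    rw [List.range_succ, List.foldl_append]
    simp only [List.foldl_cons, List.foldl_nil]
    exact pvRow_shape m n C (ih h)

theorem pvGrid_entry (m : List (List Int)) {R C : Nat} (n : Nat) {g : List (List Int)}
    (h : pvShape g R C) (x y : Nat) (hx : x < R) (hy : y < C) :
    pvE ((List.range n).foldl (fun g i =>
      (List.range C).foldl (fun g j => pvScat5 (R : Int) (C : Int) (pvVal m i j) g (i : Int) (j : Int)) g) g) x y
      = pvE g x y + ((List.range n).map (fun (i : Nat) =>
          ((List.range C).map (fun (j : Nat) => pvC (i : Int) (j : Int) (x : Int) (y : Int) (pvVal m i j))).sum)).sum := by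
  induction n generalizing g with
  | zero => simp
  | succ n ih =>
    rw [List.range_succ, List.foldl_append, List.map_append, List.sum_append]
    simp only [List.foldl_cons, List.foldl_nil, List.map_cons, List.map_nil, List.sum_cons,
      List.sum_nil, add_zero]
    rw [pvRow_entry m n C (pvGrid_shape m n h) x y hx hy, ih h]
    ring

-- sum over a range of an indicator at one Int point
theorem pv_sum_ind (n : Nat) (a : Int) (f : Nat → Int) :
    ((List.range n).map (fun (i : Nat) => if (i : Int) = a then f i else 0)).sum
      = if 0 ≤ a ∧ a < (n : Int) then f a.toNat else 0 := by
  induction n with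
  | zero => simp
  | succ n ih =>
    rw [List.range_succ, List.map_append, List.sum_append, ih]
    simp only [List.map_cons, List.map_nil, List.sum_cons, List.sum_nil, add_zero]
    by_cases ha : (n : Int) = a
    · have h2 : 0 ≤ a ∧ a < ((n + 1 : Nat) : Int) := by omega
      have h3 : a.toNat = n := by omega
      simp [h2, ha, h3]
    · have h2 : (0 ≤ a ∧ a < ((n + 1 : Nat) : Int)) ↔ (0 ≤ a ∧ a < (n : Int)) := by omega
      rw [if_neg ha, add_zero]
      exact if_congr h2.symm rfl rfl

theorem pv_sum2_ind (Rn Cn : Nat) (a b : Int) (f : Nat → Nat → Int) :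
    ((List.range Rn).map (fun (i : Nat) =>
        ((List.range Cn).map (fun (j : Nat) => if (i : Int) = a ∧ (j : Int) = b then f i j else 0)).sum)).sum
      = if 0 ≤ a ∧ a < (Rn : Int) ∧ 0 ≤ b ∧ b < (Cn : Int) then f a.toNat b.toNat else 0 := by
  have inner : ∀ i : Nat,
      ((List.range Cn).map (fun (j : Nat) => if (i : Int) = a ∧ (j : Int) = b then f i j else 0)).sum
        = if (i : Int) = a then (if 0 ≤ b ∧ b < (Cn : Int) then f i b.toNat else 0) else 0 := by
    intro i
    by_cases hia : (i : Int) = a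
    · simp only [hia, true_and]
      exact pv_sum_ind Cn b (f i)
    · simp [hia]
  simp only [inner]
  rw [pv_sum_ind Rn a (fun i => if 0 ≤ b ∧ b < (Cn : Int) then f i b.toNat else 0)]
  split_ifs <;> first | rfl | omega

-- the scattered double sum of contributions at a fixed center is A's gathered total
theorem pv_sum_pvC (m : List (List Int)) (Rn Cn x y : Nat) :
    ((List.range Rn).map (fun (i : Nat) =>
        ((List.range Cn).map (fun (j : Nat) => pvC (i : Int) (j : Int) (x : Int) (y : Int) (pvVal m i j))).sum)).sum
      = pvTot m (Rn : Int) (Cn : Int) (x : Int) (y : Int) := by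
  have hsplit5 : ∀ (l : List Nat) (f1 f2 f3 f4 f5 : Nat → Int),
      (l.map (fun j => f1 j + f2 j + f3 j + f4 j + f5 j)).sum
        = (l.map f1).sum + (l.map f2).sum + (l.map f3).sum + (l.map f4).sum + (l.map f5).sum := by
    intro l f1 f2 f3 f4 f5
    induction l with
    | nil => simp
    | cons hd tl ih => simp only [List.map_cons, List.sum_cons, ih]; ring
  simp only [pvC]
  have inner_split : ∀ i : Nat,
      ((List.range Cn).map (fun (j : Nat) =>
          (if (i : Int) = (x : Int) ∧ (j : Int) = (y : Int) then pvVal m i j else 0) +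
          (if (i : Int) - 1 = (x : Int) ∧ (j : Int) = (y : Int) then pvVal m i j else 0) +
          (if (i : Int) + 1 = (x : Int) ∧ (j : Int) = (y : Int) then pvVal m i j else 0) +
          (if (i : Int) = (x : Int) ∧ (j : Int) - 1 = (y : Int) then pvVal m i j else 0) +
          (if (i : Int) = (x : Int) ∧ (j : Int) + 1 = (y : Int) then pvVal m i j else 0))).sum
        = ((List.range Cn).map (fun (j : Nat) => if (i : Int) = (x : Int) ∧ (j : Int) = (y : Int) then pvVal m i j else 0)).sum +
          ((List.range Cn).map (fun (j : Nat) => if (i : Int) - 1 = (x : Int) ∧ (j : Int) = (y : Int) then pvVal m i j else 0)).sum +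
          ((List.range Cn).map (fun (j : Nat) => if (i : Int) + 1 = (x : Int) ∧ (j : Int) = (y : Int) then pvVal m i j else 0)).sum +
          ((List.range Cn).map (fun (j : Nat) => if (i : Int) = (x : Int) ∧ (j : Int) - 1 = (y : Int) then pvVal m i j else 0)).sum +
          ((List.range Cn).map (fun (j : Nat) => if (i : Int) = (x : Int) ∧ (j : Int) + 1 = (y : Int) then pvVal m i j else 0)).sum :=
    fun i => hsplit5 (List.range Cn) _ _ _ _ _
  simp only [inner_split]
  rw [hsplit5 (List.range Rn)
      (fun (i : Nat) => ((List.range Cn).map (fun (j : Nat) => if (i : Int) = (x : Int) ∧ (j : Int) = (y : Int) then pvVal m i j else 0)).sum)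
      (fun (i : Nat) => ((List.range Cn).map (fun (j : Nat) => if (i : Int) - 1 = (x : Int) ∧ (j : Int) = (y : Int) then pvVal m i j else 0)).sum)
      (fun (i : Nat) => ((List.range Cn).map (fun (j : Nat) => if (i : Int) + 1 = (x : Int) ∧ (j : Int) = (y : Int) then pvVal m i j else 0)).sum)
      (fun (i : Nat) => ((List.range Cn).map (fun (j : Nat) => if (i : Int) = (x : Int) ∧ (j : Int) - 1 = (y : Int) then pvVal m i j else 0)).sum)
      (fun (i : Nat) => ((List.range Cn).map (fun (j : Nat) => if (i : Int) = (x : Int) ∧ (j : Int) + 1 = (y : Int) then pvVal m i j else 0)).sum)]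
  -- five scattered terms, one per offset, each collapsed by pv_sum2_ind
  rw [pv_sum2_ind Rn Cn (x : Int) (y : Int) (fun i j => pvVal m i j)]
  rw [show (fun (i : Nat) => ((List.range Cn).map (fun (j : Nat) => if (i : Int) - 1 = (x : Int) ∧ (j : Int) = (y : Int) then pvVal m i j else 0)).sum)
        = (fun (i : Nat) => ((List.range Cn).map (fun (j : Nat) => if (i : Int) = (x : Int) + 1 ∧ (j : Int) = (y : Int) then pvVal m i j else 0)).sum) from by
      funext i; exact congrArg List.sum (List.map_congr_left fun j _ => if_congr (by constructor <;> (rintro ⟨h1, h2⟩; exact ⟨by omega, h2⟩)) rfl rfl)]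
  rw [pv_sum2_ind Rn Cn ((x : Int) + 1) (y : Int) (fun i j => pvVal m i j)]
  rw [show (fun (i : Nat) => ((List.range Cn).map (fun (j : Nat) => if (i : Int) + 1 = (x : Int) ∧ (j : Int) = (y : Int) then pvVal m i j else 0)).sum)
        = (fun (i : Nat) => ((List.range Cn).map (fun (j : Nat) => if (i : Int) = (x : Int) - 1 ∧ (j : Int) = (y : Int) then pvVal m i j else 0)).sum) from by
      funext i; exact congrArg List.sum (List.map_congr_left fun j _ => if_congr (by constructor <;> (rintro ⟨h1, h2⟩; exact ⟨by omega, h2⟩)) rfl rfl)]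
  rw [pv_sum2_ind Rn Cn ((x : Int) - 1) (y : Int) (fun i j => pvVal m i j)]
  rw [show (fun (i : Nat) => ((List.range Cn).map (fun (j : Nat) => if (i : Int) = (x : Int) ∧ (j : Int) - 1 = (y : Int) then pvVal m i j else 0)).sum)
        = (fun (i : Nat) => ((List.range Cn).map (fun (j : Nat) => if (i : Int) = (x : Int) ∧ (j : Int) = (y : Int) + 1 then pvVal m i j else 0)).sum) from by
      funext i; exact congrArg List.sum (List.map_congr_left fun j _ => if_congr (by constructor <;> (rintro ⟨h1, h2⟩; exact ⟨h1, by omega⟩)) rfl rfl)]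
  rw [pv_sum2_ind Rn Cn (x : Int) ((y : Int) + 1) (fun i j => pvVal m i j)]
  rw [show (fun (i : Nat) => ((List.range Cn).map (fun (j : Nat) => if (i : Int) = (x : Int) ∧ (j : Int) + 1 = (y : Int) then pvVal m i j else 0)).sum)
        = (fun (i : Nat) => ((List.range Cn).map (fun (j : Nat) => if (i : Int) = (x : Int) ∧ (j : Int) = (y : Int) - 1 then pvVal m i j else 0)).sum) from by
      funext i; exact congrArg List.sum (List.map_congr_left fun j _ => if_congr (by constructor <;> (rintro ⟨h1, h2⟩; exact ⟨h1, by omega⟩)) rfl rfl)]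
  rw [pv_sum2_ind Rn Cn (x : Int) ((y : Int) - 1) (fun i j => pvVal m i j)]
  have hacc : ∀ (c : Prop) [Decidable c] (t v : Int), (if c then t + v else t) = t + (if c then v else 0) := by
    intro c _ t v; split <;> simp
  simp only [pvTot, List.foldl, hacc]
  ring

theorem pvE_eq_getElem {g : List (List Int)} {x y : Nat} (hx : x < g.length) (hy : y < g[x].length) :
    pvE g x y = g[x][y] := by
  have h1 : g.getD x [] = g[x] := List.getD_eq_getElem _ _ hx
  rw [pvE, h1, List.getD_eq_getElem?_getD, List.getElem?_eq_getElem hy, Option.getD_some]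

theorem pv_tot_eq (m : List (List Int)) (i j : Int) :
    ([(i, j), (i - 1, j), (i + 1, j), (i, j - 1), (i, j + 1)] : List (Int × Int)).foldl
      (fun total xy =>
        if 0 ≤ xy.1 ∧ xy.1 < (m.length : Int) ∧ 0 ≤ xy.2 ∧ xy.2 < ((m.headD []).length : Int)
        then total + PySem.List.pyGetD (PySem.List.pyGetD m xy.1 []) xy.2 0
        else total) 0
    = pvTot m (m.length : Int) ((m.headD []).length : Int) i j := by
  rw [pvTot]
  refine PySem.List.foldl_congr_mem _ _ _ _ ?_
  intro acc xy _
  obtain ⟨p, q⟩ := xy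
  by_cases hg : 0 ≤ p ∧ p < (m.length : Int) ∧ 0 ≤ q ∧ q < ((m.headD []).length : Int)
  · rw [if_pos hg, if_pos hg]
    obtain ⟨na, rfl⟩ : ∃ na : Nat, p = (na : Int) := ⟨p.toNat, (Int.toNat_of_nonneg hg.1).symm⟩
    obtain ⟨nb, rfl⟩ : ∃ nb : Nat, q = (nb : Int) := ⟨q.toNat, (Int.toNat_of_nonneg hg.2.2.1).symm⟩
    simp [pvVal]
  · rw [if_neg hg, if_neg hg]

theorem pv_sums_eq (m : List (List Int)) :
    (List.range m.length).foldl (fun g i =>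
        (List.range (m.headD []).length).foldl (fun g j =>
          pvScat5 (m.length : Int) ((m.headD []).length : Int) (pvVal m i j) g (i : Int) (j : Int)) g)
      (List.replicate m.length (List.replicate (m.headD []).length (0 : Int)))
    = (List.range m.length).map (fun (x : Nat) =>
        (List.range (m.headD []).length).map (fun (y : Nat) =>
          pvTot m (m.length : Int) ((m.headD []).length : Int) (x : Int) (y : Int))) := by
  have hsh0 : pvShape (List.replicate m.length (List.replicate (m.headD []).length (0 : Int))) m.length (m.headD []).length := by
    refine ⟨by simp, ?_⟩
    intro r hr
    rw [List.eq_of_mem_replicate hr]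
    simp
  have hsh := pvGrid_shape m (n := m.length) hsh0
  apply List.ext_getElem
  · rw [hsh.1]; simp
  intro x hx1 hx2
  have hx : x < m.length := by rw [← hsh.1]; exact hx1
  apply List.ext_getElem
  · rw [hsh.2 _ (List.getElem_mem hx1)]; simp
  intro y hy1 hy2
  have hy : y < (m.headD []).length := by rw [← hsh.2 _ (List.getElem_mem hx1)]; exact hy1
  rw [← pvE_eq_getElem hx1 hy1,
      pvGrid_entry m (n := m.length) hsh0 x y hx hy, pv_sum_pvC m _ _ x y]
  have h0 : pvE (List.replicate m.length (List.replicate (m.headD []).length (0 : Int))) x y = 0 := by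
    rw [pvE, List.getD_replicate _ hx, List.getD_replicate _ hy]
  rw [h0, zero_add]
  simp

theorem max_adjacent_sum_spec : Claim_equal_max_adjacent_sum := by
  intro m _ _
  unfold Spec_max_adjacent_sum
  have hcol : PySem.List.pyGetD m 0 [] = m.headD [] := by
    cases m <;> simp [PySem.List.pyGetD_zero]
  have hB : max_adjacent_sum_alt m
      = ((List.range m.length).foldl (fun g i =>
            (List.range (m.headD []).length).foldl (fun g j =>
              pvScat5 (m.length : Int) ((m.headD []).length : Int) (pvVal m i j) g (i : Int) (j : Int)) g)
          (List.replicate m.length (List.replicate (m.headD []).length (0 : Int)))).foldl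
          (fun best row => row.foldl (fun best s => if best < s then s else best) best) (-999999) := rfl
  rw [hB, pv_sums_eq m]
  unfold max_adjacent_sum
  simp only [PySem.List.len_eq, hcol, PySem.List.pyRange_zero_natCast, List.foldl_map, pv_tot_eq m]
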